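-- pv_equiv track=rewrite | github.com/Arci-FL/Weekend_Challenges | ticket.py | revenue_calc
-- ===== SOURCE A (Python) =====
-- def revenue_calc(data, disc_age):
--     count_adult = 0
--     count_child = 0
--     for i in data.values():
--         if (i >= disc_age):
--             count_adult += 1
--         else:
--             count_child += 1
--
--     rev_adult = count_adult * 20
--     rev_child = count_child * 5
--
--     total_rev = rev_adult + rev_child
--
--     return total_rev
-- ===== SOURCE B (Python) =====
-- def revenue_calc(data, disc_age):
--     # Sort the ages; everyone paying the child price (< disc_age) forms a
--     # prefix of the sorted list, found by binary search (bisect_left).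
--     vals = sorted(data.values())
--     lo, hi = 0, len(vals)
--     while lo < hi:
--         mid = (lo + hi) // 2
--         if vals[mid] < disc_age:
--             lo = mid + 1
--         else:
--             hi = mid
--     return 20 * (len(vals) - lo) + 5 * lo
-- ===== Notes on version B (the rewrite author's own statement) =====
-- stated objective: alternative
-- what changed: Instead of counting adults and children in one pass, B sorts the values and locates the child/adult boundary with a hand-written binary search (bisect_left), pricing the prefix as children and the suffix as adults.
import Mathlib
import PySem

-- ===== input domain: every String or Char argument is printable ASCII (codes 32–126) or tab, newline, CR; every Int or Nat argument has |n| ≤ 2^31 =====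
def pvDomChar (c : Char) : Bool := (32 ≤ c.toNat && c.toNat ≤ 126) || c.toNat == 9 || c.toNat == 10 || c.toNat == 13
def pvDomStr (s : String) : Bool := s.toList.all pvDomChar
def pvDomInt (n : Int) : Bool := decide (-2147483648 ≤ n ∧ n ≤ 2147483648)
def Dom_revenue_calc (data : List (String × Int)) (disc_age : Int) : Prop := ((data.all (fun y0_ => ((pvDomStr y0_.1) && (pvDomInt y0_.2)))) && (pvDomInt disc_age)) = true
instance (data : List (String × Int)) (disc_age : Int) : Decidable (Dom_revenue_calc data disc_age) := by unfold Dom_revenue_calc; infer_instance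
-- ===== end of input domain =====

-- B sorts the values and finds the child/adult boundary by binary search instead of counting in one pass (objective: alternative).


-- ===== PORT A =====
def revenue_calc (data : List (String × Int)) (disc_age : Int) : Int :=
  let counts := data.foldl (fun (st : Int × Int) kv =>
    if kv.2 >= disc_age then (st.1 + 1, st.2) else (st.1, st.2 + 1)) (0, 0)
  let rev_adult := counts.1 * 20
  let rev_child := counts.2 * 5
  rev_adult + rev_child

-- ===== PORT B =====
-- the while-loop of Source B; vals[mid] is always in range (lo < hi ≤ len), so getD is exact there
def pvBsearch (vals : List Int) (t : Int) (lo hi : Nat) : Nat :=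
  if _h : lo < hi then
    let mid := (lo + hi) / 2
    if vals.getD mid 0 < t then pvBsearch vals t (mid + 1) hi else pvBsearch vals t lo mid
  else lo
termination_by hi - lo
decreasing_by all_goals omega

def revenue_calc_alt (data : List (String × Int)) (disc_age : Int) : Int :=
  let vals := PySem.List.sorted (data.map Prod.snd) (fun x => x) false
  let lo := pvBsearch vals disc_age 0 vals.length
  20 * ((vals.length : Int) - lo) + 5 * lo

-- ===== PRECONDITION & SPEC =====
def Spec_revenue_calc (data : List (String × Int)) (disc_age : Int) (out : Int) : Prop := out = revenue_calc_alt data disc_age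
instance (data : List (String × Int)) (disc_age : Int) (out : Int) : Decidable (Spec_revenue_calc data disc_age out) := by unfold Spec_revenue_calc; infer_instance

-- ===== CLAIM (what is proved, stated in full; the proofs are below) =====
def Claim_equal_revenue_calc : Prop := ∀ (data : List (String × Int)) (disc_age : Int), Dom_revenue_calc data disc_age → Spec_revenue_calc data disc_age (revenue_calc data disc_age)

-- ===== LEMMAS AND PROOFS =====

-- A's fold computes (#adults, #children) = (#(≥ t), n − #(≥ t))
lemma revenue_calc_fold_inv (t : Int) (data : List (String × Int)) (a c : Int) :
    data.foldl (fun (st : Int × Int) kv =>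
      if kv.2 >= t then (st.1 + 1, st.2) else (st.1, st.2 + 1)) (a, c)
    = (a + ((data.filter (fun kv => kv.2 >= t)).length : Int),
       c + ((data.length : Int) - (data.filter (fun kv => kv.2 >= t)).length)) := by
  induction data generalizing a c with
  | nil => simp
  | cons hd tl ih =>
    simp only [List.foldl_cons, List.filter_cons, List.length_cons]
    by_cases h : hd.2 >= t
    · simp [h, ih, Prod.ext_iff]; omega
    · simp [h, ih, Prod.ext_iff]; omega

-- in a sorted list, the elements < t are exactly the prefix of length countP (· < t)
lemma countP_lt_prefix (t : Int) (l : List Int) (hp : l.Pairwise (· ≤ ·)) :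
    ∀ i (hi : i < l.length), (l[i] < t ↔ i < l.countP (fun x => decide (x < t))) := by
  induction l with
  | nil => intro i hi; simp at hi
  | cons a l ih =>
    rcases List.pairwise_cons.mp hp with ⟨ha, hl⟩
    intro i hi
    cases i with
    | zero =>
      by_cases hat : a < t
      · simp [hat]
      · have hz : l.countP (fun x => decide (x < t)) = 0 := by
          rw [List.countP_eq_zero]
          intro x hx
          simp only [decide_eq_true_eq]
          exact not_lt.mpr (le_trans (not_lt.mp hat) (ha x hx))
        simp [hat, hz]
    | succ j =>
      have hj : j < l.length := by simpa using hi
      by_cases hat : a < t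
      · have hcc : (a :: l).countP (fun x => decide (x < t))
            = l.countP (fun x => decide (x < t)) + 1 := by
          simp [hat]
        have hiff := ih hl j hj
        simp only [List.getElem_cons_succ, hcc, hiff]
        omega
      · have hz : l.countP (fun x => decide (x < t)) = 0 := by
          rw [List.countP_eq_zero]
          intro x hx
          simp only [decide_eq_true_eq]
          exact not_lt.mpr (le_trans (not_lt.mp hat) (ha x hx))
        have hge : ¬ l[j] < t :=
          not_lt.mpr (le_trans (not_lt.mp hat) (ha _ (List.getElem_mem hj)))
        simp [hat, hz, hge]

-- binary search on a sorted list returns countP (· < t)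
lemma pvBsearch_eq (l : List Int) (t : Int) (hp : l.Pairwise (· ≤ ·)) :
    ∀ (n lo hi : Nat), hi - lo ≤ n → lo ≤ l.countP (fun x => decide (x < t)) →
      l.countP (fun x => decide (x < t)) ≤ hi → hi ≤ l.length →
      pvBsearch l t lo hi = l.countP (fun x => decide (x < t)) := by
  intro n
  induction n with
  | zero =>
    intro lo hi hn h1 h2 h3
    have hnl : ¬ lo < hi := by omega
    rw [pvBsearch, dif_neg hnl]; omega
  | succ n ih =>
    intro lo hi hn h1 h2 h3
    by_cases h : lo < hi
    · have hmidlen : (lo + hi) / 2 < l.length := by omega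
      have hget : l.getD ((lo + hi) / 2) 0 = l[(lo + hi) / 2] :=
        List.getD_eq_getElem l 0 hmidlen
      rw [pvBsearch, dif_pos h]
      by_cases hlt : l.getD ((lo + hi) / 2) 0 < t
      · simp only [if_pos hlt]
        have hc : (lo + hi) / 2 < l.countP (fun x => decide (x < t)) := by
          rw [← countP_lt_prefix t l hp _ hmidlen, ← hget]; exact hlt
        exact ih ((lo + hi) / 2 + 1) hi (by omega) (by omega) h2 h3
      · simp only [if_neg hlt]
        have hc : l.countP (fun x => decide (x < t)) ≤ (lo + hi) / 2 := by
          by_contra hcon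
          exact hlt (by rw [hget, countP_lt_prefix t l hp _ hmidlen]; omega)
        exact ih lo ((lo + hi) / 2) (by omega) h1 hc (by omega)
    · rw [pvBsearch, dif_neg h]; omega

-- counting < t on values vs counting ≥ t on pairs
lemma countP_lt_add_filter_ge (t : Int) (data : List (String × Int)) :
    (data.map Prod.snd).countP (fun x => decide (x < t))
      + (data.filter (fun kv => kv.2 >= t)).length = data.length := by
  induction data with
  | nil => simp
  | cons hd tl ih =>
    simp only [List.map_cons, List.countP_cons, List.filter_cons, List.length_cons]
    by_cases h : hd.2 ≥ t
    · have e1 : decide (hd.2 < t) = false := decide_eq_false (not_lt.mpr h)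
      have e2 : decide (hd.2 ≥ t) = true := decide_eq_true h
      simp only [e1, e2, if_true, if_false, Bool.false_eq_true, List.length_cons]
      omega
    · have e1 : decide (hd.2 < t) = true := decide_eq_true (lt_of_not_ge h)
      have e2 : decide (hd.2 ≥ t) = false := decide_eq_false h
      simp only [e1, e2, if_true, if_false, Bool.false_eq_true]
      omega

-- ===== VERDICT (by name: the statement is the Claim_ definition above) =====
theorem revenue_calc_spec : Claim_equal_revenue_calc := by
  intro data disc_age _
  unfold Spec_revenue_calc revenue_calc revenue_calc_alt
  simp only []
  rw [revenue_calc_fold_inv]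
  set vals := PySem.List.sorted (data.map Prod.snd) (fun x => x) false with hvals
  have hperm : vals.Perm (data.map Prod.snd) := PySem.List.sorted_perm _ _ _
  have hpw : vals.Pairwise (· ≤ ·) := by
    have := PySem.List.sorted_pairwise (xs := data.map Prod.snd) (key := fun x => x)
    simpa using this
  have hlen : vals.length = data.length := by
    rw [hperm.length_eq, List.length_map]
  have hcount : vals.countP (fun x => decide (x < disc_age))
      = (data.map Prod.snd).countP (fun x => decide (x < disc_age)) := hperm.countP_eq _
  have hcle : vals.countP (fun x => decide (x < disc_age)) ≤ vals.length :=
    List.countP_le_length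
  rw [pvBsearch_eq vals disc_age hpw vals.length 0 vals.length (by omega) (Nat.zero_le _) hcle (le_refl _)]
  have hsum := countP_lt_add_filter_ge disc_age data
  rw [hcount]
  have hfle : (data.filter (fun kv => kv.2 >= disc_age)).length ≤ data.length :=
    List.length_filter_le _ _
  rw [hlen]
  push_cast
  omega
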